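-- pv_equiv track=rewrite | github.com/icedsoup/SniperBot | main.py | _fix_vu_confusion
-- ===== SOURCE A (Python) =====
-- _CONSONANTS = frozenset('bcdfghjklmnpqrstvwxyzBCDFGHJKLMNPQRSTVWXYZ')
--
-- def _fix_vu_confusion(text: str) -> str:
--     """
--     EasyOCR sometimes reads 'v' as 'u' for the Karuta card font.
--     """
--     if 'u' not in text and 'U' not in text:
--         return text
--     chars = list(text)
--     for i, ch in enumerate(chars):
--         if ch not in ('u', 'U'):
--             continue
--         prev_ok = i > 0 and chars[i - 1] in _CONSONANTS
--         next_ok = i < len(chars) - 1 and chars[i + 1] in _CONSONANTS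
--         if prev_ok and next_ok:
--             chars[i] = 'v' if ch == 'u' else 'V'
--     return ''.join(chars)
-- ===== SOURCE B (Python) =====
-- _CONSONANTS = frozenset('bcdfghjklmnpqrstvwxyzBCDFGHJKLMNPQRSTVWXYZ')
--
-- def _fix_vu_confusion(text: str) -> str:
--     # Jump between 'u'/'U' occurrences with str.find, copying the untouched
--     # stretches wholesale by slicing; only occurrence positions are examined.
--     n = len(text)
--     pieces = []
--     start = 0
--     while True:
--         iu = text.find('u', start)
--         iU = text.find('U', start)
--         if iu < 0:
--             i = iU
--         elif iU < 0:
--             i = iu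
--         else:
--             i = min(iu, iU)
--         if i < 0:
--             pieces.append(text[start:])
--             return ''.join(pieces)
--         pieces.append(text[start:i])
--         ch = text[i]
--         if 0 < i < n - 1 and text[i - 1] in _CONSONANTS and text[i + 1] in _CONSONANTS:
--             pieces.append('v' if ch == 'u' else 'V')
--         else:
--             pieces.append(ch)
--         start = i + 1
-- ===== Notes on version B (the rewrite author's own statement) =====
-- stated objective: alternative
-- what changed: Replaces A's per-character index loop mutating a char list in place with a loop that jumps from one u/U occurrence to the next via str.find, copying the untouched stretches between occurrences wholesale by slicing.
import Mathlib
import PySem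

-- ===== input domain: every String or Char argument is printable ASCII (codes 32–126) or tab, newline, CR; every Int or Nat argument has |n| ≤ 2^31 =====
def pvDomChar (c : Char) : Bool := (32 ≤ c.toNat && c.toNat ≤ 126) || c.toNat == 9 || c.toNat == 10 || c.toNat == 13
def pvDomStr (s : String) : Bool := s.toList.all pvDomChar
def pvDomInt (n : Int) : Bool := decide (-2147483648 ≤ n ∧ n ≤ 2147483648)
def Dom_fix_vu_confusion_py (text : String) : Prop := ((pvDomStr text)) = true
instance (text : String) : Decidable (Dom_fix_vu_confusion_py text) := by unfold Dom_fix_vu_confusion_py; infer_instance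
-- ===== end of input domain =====

-- B replaces A's per-character index loop (mutating a char list in place) by a loop
-- that jumps from one u/U occurrence to the next with str.find, copying the
-- untouched stretches between occurrences wholesale by slicing (objective: alternative).

-- ===== PORT A =====
-- _CONSONANTS (list of the distinct characters of the frozenset literal)
def pvConsonants : List Char := "bcdfghjklmnpqrstvwxyzBCDFGHJKLMNPQRSTVWXYZ".toList

def pvIsCons (c : Char) : Bool := pvConsonants.contains c

-- loop body of A's `for i, ch in enumerate(chars)` (cs = the mutable list `chars`)
def pvStepA (cs : List Char) (p : Char × Nat) : List Char :=
  let ch := p.1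
  let i := p.2
  if ch ≠ 'u' ∧ ch ≠ 'U' then cs
  else
    let prev_ok := decide (0 < i) && pvIsCons (cs.getD (i - 1) ' ')
    let next_ok := decide (i < cs.length - 1) && pvIsCons (cs.getD (i + 1) ' ')
    if prev_ok && next_ok then cs.set i (if ch = 'u' then 'v' else 'V') else cs

def fix_vu_confusion_py (text : String) : String :=
  -- `'u' not in text` for a 1-char needle = list containment
  if ¬(text.toList.contains 'u' = true) ∧ ¬(text.toList.contains 'U' = true) then text
  else
    let chars := text.toList
    String.mk (chars.zipIdx.foldl pvStepA chars)

-- ===== PORT B =====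
-- `text.find(c, start)`: scan from index `start`, -1 when absent (Python's find is this scan)
def pvFindCh (l : List Char) (c : Char) (start : Nat) : Int :=
  if h : start < l.length then
    if l[start] = c then (start : Int) else pvFindCh l c (start + 1)
  else -1
termination_by l.length - start

-- the `iu`/`iU` min-combination of Source B's loop head
def pvFindVU (l : List Char) (start : Nat) : Int :=
  let iu := pvFindCh l 'u' start
  let iU := pvFindCh l 'U' start
  if iu < 0 then iU else if iU < 0 then iu else min iu iU

-- bounds needed for termination of the Source B while-loop (cited in decreasing_by)
theorem pvFindCh_cases (l : List Char) (c : Char) (start : Nat) :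
    pvFindCh l c start < 0 ∨
    (start ≤ (pvFindCh l c start).toNat ∧ (pvFindCh l c start).toNat < l.length) := by
  fun_induction pvFindCh l c start with
  | case1 start h1 h2 => right; simp only [Int.toNat_natCast]; omega
  | case2 start h1 h2 ih =>
    rcases ih with h | ⟨a, b⟩
    · exact Or.inl h
    · exact Or.inr ⟨by omega, b⟩
  | case3 start h1 => left; norm_num

theorem pvFindCh_bounds (l : List Char) (c : Char) (start : Nat)
    (h : ¬ pvFindCh l c start < 0) :
    start ≤ (pvFindCh l c start).toNat ∧ (pvFindCh l c start).toNat < l.length :=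
  (pvFindCh_cases l c start).resolve_left h

theorem pvFindVU_bounds (l : List Char) (start : Nat)
    (h : ¬ pvFindVU l start < 0) :
    start ≤ (pvFindVU l start).toNat ∧ (pvFindVU l start).toNat < l.length := by
  unfold pvFindVU at *
  dsimp only at *
  split_ifs at * with h1 h2
  · exact pvFindCh_bounds l 'U' start h
  · exact pvFindCh_bounds l 'u' start h
  · have b1 := pvFindCh_bounds l 'u' start h1
    have b2 := pvFindCh_bounds l 'U' start h2
    rcases le_total (pvFindCh l 'u' start) (pvFindCh l 'U' start) with hle | hle <;>
      [rw [min_eq_left hle]; rw [min_eq_right hle]] <;> [exact b1; exact b2]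

-- the while-loop of Source B: pieces accumulated into acc (''.join at the end = this append order);
-- text[start:i] for 0 ≤ start ≤ i = (l.drop start).take (i - start)
def pvLoopB (l : List Char) (start : Nat) (acc : List Char) : List Char :=
  let i := pvFindVU l start
  if h : i < 0 then acc ++ l.drop start
  else
    let i := i.toNat
    let ch := l.getD i ' '
    let rep := if 0 < i ∧ i < l.length - 1 ∧ pvIsCons (l.getD (i - 1) ' ') = true
                    ∧ pvIsCons (l.getD (i + 1) ' ') = true
               then (if ch = 'u' then 'v' else 'V') else ch
    pvLoopB l (i + 1) (acc ++ (l.drop start).take (i - start) ++ [rep])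
termination_by l.length - start
decreasing_by
  have := pvFindVU_bounds l start h
  omega

def fix_vu_confusion_py_alt (text : String) : String :=
  String.mk (pvLoopB text.toList 0 [])

-- ===== PRECONDITION & SPEC =====
def Spec_fix_vu_confusion_py (text : String) (out : String) : Prop := out = fix_vu_confusion_py_alt text
instance (text : String) (out : String) : Decidable (Spec_fix_vu_confusion_py text out) := by unfold Spec_fix_vu_confusion_py; infer_instance

-- ===== CLAIM (what is proved, stated in full; the proofs are below) =====
def Claim_equal_fix_vu_confusion_py : Prop := ∀ (text : String), Dom_fix_vu_confusion_py text → Spec_fix_vu_confusion_py text (fix_vu_confusion_py text)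

-- ===== LEMMAS AND PROOFS =====

-- what both programs compute at position i, read off the ORIGINAL list
def pvRef (l : List Char) (i : Nat) : Char :=
  let c := l.getD i ' '
  if (c = 'u' ∨ c = 'U') ∧ (0 < i ∧ pvIsCons (l.getD (i - 1) ' ') = true)
       ∧ (i + 1 < l.length ∧ pvIsCons (l.getD (i + 1) ' ') = true)
  then (if c = 'u' then 'v' else 'V') else c

lemma pvIsCons_u : pvIsCons 'u' = false := by decide
lemma pvIsCons_U : pvIsCons 'U' = false := by decide

lemma pvRef_eq_self_of_next_not_cons (l : List Char) (i : Nat)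
    (h : pvIsCons (l.getD (i + 1) ' ') = false) : pvRef l i = l.getD i ' ' := by
  unfold pvRef
  rw [if_neg]
  rintro ⟨-, -, -, h2⟩
  rw [List.getD_eq_getElem?_getD] at h
  simp [h] at h2

lemma pvRef_eq_self_of_not_vu (l : List Char) (i : Nat)
    (h : l.getD i ' ' ≠ 'u' ∧ l.getD i ' ' ≠ 'U') : pvRef l i = l.getD i ' ' := by
  unfold pvRef
  rw [if_neg]
  rintro ⟨h1, -, -⟩
  rw [List.getD_eq_getElem?_getD] at h1
  rcases h1 with h1 | h1 <;> simp [h1] at h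

-- A's fold, characterized elementwise
lemma pvFoldA_spec : ∀ (t l : List Char) (k : Nat) (cs : List Char),
    l.drop k = t →
    cs.length = l.length →
    (∀ j, j < k → cs[j]? = some (pvRef l j)) →
    (∀ j, k ≤ j → cs[j]? = l[j]?) →
    ∀ j, ((t.zipIdx k).foldl pvStepA cs)[j]? =
      if j < l.length then some (pvRef l j) else none := by
  intro t
  induction t with
  | nil =>
    intro l k cs hdrop hlen h1 h2 j
    have hk : l.length ≤ k := by
      by_contra h
      have := List.drop_eq_nil_iff.mp hdrop
      omega
    simp only [List.zipIdx_nil, List.foldl_nil]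
    by_cases hj : j < l.length
    · simp [hj, h1 j (by omega)]
    · simp only [if_neg hj]
      exact List.getElem?_eq_none (by omega)
  | cons c t' ih =>
    intro l k cs hdrop hlen h1 h2 j
    have hlk : l[k]? = some c := by
      have : (l.drop k)[0]? = some c := by rw [hdrop]; rfl
      rwa [List.getElem?_drop, Nat.add_zero] at this
    have hklen : k < l.length := by
      by_contra h
      rw [List.getElem?_eq_none (by omega)] at hlk; simp at hlk
    have hgdk : l.getD k ' ' = c := by
      rw [List.getD_eq_getElem?_getD, hlk]; rfl
    have hdrop' : l.drop (k + 1) = t' := by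
      have : (l.drop k).drop 1 = t' := by rw [hdrop]; rfl
      rw [List.drop_drop] at this
      simpa [Nat.add_comm] using this
    rw [List.zipIdx_cons, List.foldl_cons]
    apply ih l (k + 1) (pvStepA cs (c, k)) hdrop'
    · unfold pvStepA
      dsimp only
      split
      · exact hlen
      · split
        · simpa using hlen
        · exact hlen
    · intro j hj
      unfold pvStepA
      dsimp only
      by_cases hc : c ≠ 'u' ∧ c ≠ 'U'
      · rw [if_pos hc]
        rcases Nat.lt_or_ge j k with hjk | hjk
        · exact h1 j hjk
        · have hjk' : j = k := by omega
          subst hjk'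
          rw [h2 j le_rfl, hlk, pvRef_eq_self_of_not_vu l j (by rw [hgdk]; exact hc), hgdk]
      · rw [if_neg hc]
        push_neg at hc
        have hcu : c = 'u' ∨ c = 'U' := by
          by_cases h : c = 'u'
          · exact Or.inl h
          · exact Or.inr (hc h)
        have hccons : pvIsCons c = false := by
          rcases hcu with h | h <;> rw [h]
          · exact pvIsCons_u
          · exact pvIsCons_U
        have hprev : 0 < k → cs.getD (k - 1) ' ' = l.getD (k - 1) ' ' := by
          intro hk0
          rw [List.getD_eq_getElem?_getD, h1 (k - 1) (by omega),
              Option.getD_some, List.getD_eq_getElem?_getD]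
          have : pvRef l (k - 1) = l.getD (k - 1) ' ' := by
            apply pvRef_eq_self_of_next_not_cons
            have : k - 1 + 1 = k := by omega
            rw [this, hgdk, hccons]
          rw [this, List.getD_eq_getElem?_getD]
        have hnext : cs.getD (k + 1) ' ' = l.getD (k + 1) ' ' := by
          rw [List.getD_eq_getElem?_getD, h2 (k + 1) (by omega),
              List.getD_eq_getElem?_getD]
        by_cases hcond : (decide (0 < k) && pvIsCons (cs.getD (k - 1) ' ')
            && (decide (k < cs.length - 1) && pvIsCons (cs.getD (k + 1) ' '))) = true
        · rw [if_pos hcond]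
          simp only [Bool.and_eq_true, decide_eq_true_eq] at hcond
          obtain ⟨⟨hk0, hpc⟩, hklt, hnc⟩ := hcond
          rcases Nat.lt_or_ge j k with hjk | hjk
          · rw [List.getElem?_set_ne (by omega), h1 j hjk]
          · have hjk' : j = k := by omega
            subst hjk'
            rw [List.getElem?_set_self']
            · have : pvRef l j = (if c = 'u' then 'v' else 'V') := by
                unfold pvRef
                rw [if_pos]
                · rw [hgdk]
                · refine ⟨by rw [hgdk]; exact hcu, ⟨hk0, ?_⟩, ⟨by omega, ?_⟩⟩
                  · rw [← hprev hk0]; exact hpc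
                  · rw [← hnext]; exact hnc
              rw [this, h2 j le_rfl, hlk]
              rfl
        · rw [if_neg hcond]
          rcases Nat.lt_or_ge j k with hjk | hjk
          · exact h1 j hjk
          · have hjk' : j = k := by omega
            subst hjk'
            rw [h2 j le_rfl, hlk]
            have : pvRef l j = l.getD j ' ' := by
              unfold pvRef
              rw [if_neg]
              rintro ⟨-, ⟨hk0, hpc⟩, hklt, hnc⟩
              apply hcond
              simp only [Bool.and_eq_true, decide_eq_true_eq]
              exact ⟨⟨hk0, by rw [hprev hk0]; exact hpc⟩, by omega, by rw [hnext]; exact hnc⟩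
            rw [this, List.getD_eq_getElem?_getD, hlk]
            rfl
    · intro j hj
      unfold pvStepA
      dsimp only
      split
      · exact h2 j (by omega)
      · split
        · rw [List.getElem?_set_ne (by omega)]
          exact h2 j (by omega)
        · exact h2 j (by omega)

-- the reference output: every position rewritten from the original list
def pvRefList (l : List Char) : List Char := (List.range' 0 l.length).map (pvRef l)

lemma pvRefList_getElem? (l : List Char) (j : Nat) :
    (pvRefList l)[j]? = if j < l.length then some (pvRef l j) else none := by
  unfold pvRefList
  by_cases h : j < l.length <;> simp [h]

-- A's result is pvRefList
lemma pvA_eq_refList (l : List Char) : l.zipIdx.foldl pvStepA l = pvRefList l := by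
  apply List.ext_getElem?
  intro j
  rw [pvFoldA_spec l l 0 l rfl rfl (by omega) (fun _ _ => rfl) j, pvRefList_getElem? l j]

-- spec of pvFindCh: -1 means no occurrence from start; otherwise the first occurrence
lemma pvFindCh_none (l : List Char) (c : Char) (start : Nat)
    (h : pvFindCh l c start < 0) :
    ∀ j, start ≤ j → j < l.length → l.getD j ' ' ≠ c := by
  fun_induction pvFindCh l c start with
  | case1 start h1 h2 => exact absurd h (by omega)
  | case2 start h1 h2 ih =>
    intro j hj1 hj2
    rcases Nat.eq_or_lt_of_le hj1 with rfl | hlt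
    · rw [List.getD_eq_getElem?_getD, List.getElem?_eq_getElem h1]
      simpa using h2
    · exact ih (by simpa using h) j hlt hj2
  | case3 start h1 =>
    intro j hj1 hj2; omega

lemma pvFindCh_found (l : List Char) (c : Char) (start : Nat)
    (h : ¬ pvFindCh l c start < 0) :
    l.getD (pvFindCh l c start).toNat ' ' = c ∧
    ∀ j, start ≤ j → j < (pvFindCh l c start).toNat → l.getD j ' ' ≠ c := by
  fun_induction pvFindCh l c start with
  | case1 start h1 h2 =>
    constructor
    · simp only [Int.toNat_natCast]
      rw [List.getD_eq_getElem?_getD, List.getElem?_eq_getElem h1]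
      simpa using h2
    · intro j hj1 hj2; omega
  | case2 start h1 h2 ih =>
    rcases ih (by simpa using h) with ⟨ha, hb⟩
    refine ⟨ha, fun j hj1 hj2 => ?_⟩
    rcases Nat.eq_or_lt_of_le hj1 with rfl | hlt
    · rw [List.getD_eq_getElem?_getD, List.getElem?_eq_getElem h1]
      simpa using h2
    · exact hb j hlt hj2
  | case3 start h1 => exact absurd (by norm_num : (-1 : Int) < 0) h

-- spec of pvFindVU
lemma pvFindVU_none (l : List Char) (start : Nat)
    (h : pvFindVU l start < 0) :
    ∀ j, start ≤ j → j < l.length → l.getD j ' ' ≠ 'u' ∧ l.getD j ' ' ≠ 'U' := by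
  intro j hj1 hj2
  unfold pvFindVU at h
  dsimp only at h
  split_ifs at h with h1 h2
  · exact ⟨pvFindCh_none l 'u' start h1 j hj1 hj2, pvFindCh_none l 'U' start h j hj1 hj2⟩
  · exact ⟨pvFindCh_none l 'u' start h j hj1 hj2, pvFindCh_none l 'U' start h2 j hj1 hj2⟩
  · exfalso
    rcases pvFindCh_bounds l 'u' start h1 with ⟨a, b⟩
    rcases pvFindCh_bounds l 'U' start h2 with ⟨a', b'⟩
    rcases le_total (pvFindCh l 'u' start) (pvFindCh l 'U' start) with hle | hle
    · rw [min_eq_left hle] at h; omega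
    · rw [min_eq_right hle] at h; omega

lemma pvFindVU_found (l : List Char) (start : Nat)
    (h : ¬ pvFindVU l start < 0) :
    (l.getD (pvFindVU l start).toNat ' ' = 'u' ∨ l.getD (pvFindVU l start).toNat ' ' = 'U') ∧
    ∀ j, start ≤ j → j < (pvFindVU l start).toNat →
      l.getD j ' ' ≠ 'u' ∧ l.getD j ' ' ≠ 'U' := by
  unfold pvFindVU at *
  dsimp only at *
  split_ifs at * with h1 h2
  · rcases pvFindCh_found l 'U' start h with ⟨ha, hb⟩
    refine ⟨Or.inr ha, fun j hj1 hj2 => ⟨pvFindCh_none l 'u' start h1 j hj1 ?_, hb j hj1 hj2⟩⟩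
    have := pvFindCh_bounds l 'U' start h
    omega
  · rcases pvFindCh_found l 'u' start h with ⟨ha, hb⟩
    refine ⟨Or.inl ha, fun j hj1 hj2 => ⟨hb j hj1 hj2, pvFindCh_none l 'U' start h2 j hj1 ?_⟩⟩
    have := pvFindCh_bounds l 'u' start h
    omega
  · rcases pvFindCh_found l 'u' start h1 with ⟨hau, hbu⟩
    rcases pvFindCh_found l 'U' start h2 with ⟨haU, hbU⟩
    rcases le_total (pvFindCh l 'u' start) (pvFindCh l 'U' start) with hle | hle
    · rw [min_eq_left hle] at *
      refine ⟨Or.inl hau, fun j hj1 hj2 => ⟨hbu j hj1 hj2, hbU j hj1 ?_⟩⟩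
      have := pvFindCh_bounds l 'u' start h1
      omega
    · rw [min_eq_right hle] at *
      refine ⟨Or.inr haU, fun j hj1 hj2 => ⟨hbu j hj1 ?_, hbU j hj1 hj2⟩⟩
      have := pvFindCh_bounds l 'U' start h2
      omega

-- a stretch with no 'u'/'U' maps to itself under pvRef
lemma pvMap_range'_eq_slice (l : List Char) (start m : Nat)
    (hm : start + m ≤ l.length)
    (h : ∀ j, start ≤ j → j < start + m → l.getD j ' ' ≠ 'u' ∧ l.getD j ' ' ≠ 'U') :
    (List.range' start m).map (pvRef l) = (l.drop start).take m := by
  apply List.ext_getElem?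
  intro k
  by_cases hk : k < m
  · rw [List.getElem?_map, List.getElem?_range' (by omega)]
    simp only [Nat.one_mul]
    have hlt : start + k < l.length := by omega
    rw [List.getElem?_take_of_lt hk, List.getElem?_drop,
        List.getElem?_eq_getElem hlt]
    simp only [Option.map_some]
    congr 1
    rw [pvRef_eq_self_of_not_vu l (start + k) (h (start + k) (by omega) (by omega)),
        List.getD_eq_getElem?_getD, List.getElem?_eq_getElem hlt]
    rfl
  · rw [List.getElem?_map, List.getElem?_eq_none (by simp; omega),
        List.getElem?_eq_none (by simp; omega)]
    rfl

-- B's loop produces the pvRefList suffix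
lemma pvLoopB_spec (l : List Char) : ∀ (start : Nat) (acc : List Char),
    start ≤ l.length →
    pvLoopB l start acc = acc ++ (List.range' start (l.length - start)).map (pvRef l) := by
  intro start acc
  fun_induction pvLoopB l start acc with
  | case1 start acc i h =>
    intro hs
    congr 1
    rw [pvMap_range'_eq_slice l start (l.length - start) (by omega)
          (fun j hj1 hj2 => pvFindVU_none l start h j hj1 (by omega)),
        List.take_of_length_le (by simp)]
  | case2 start acc i0 h i ch rep ih =>
    intro hs
    rcases pvFindVU_bounds l start h with ⟨hsi, hil⟩
    rcases pvFindVU_found l start h with ⟨hch, hpre⟩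
    have hsi' : start ≤ i := hsi
    have hil' : i < l.length := hil
    have hch' : l.getD i ' ' = 'u' ∨ l.getD i ' ' = 'U' := hch
    have hpre' : ∀ j, start ≤ j → j < i → l.getD j ' ' ≠ 'u' ∧ l.getD j ' ' ≠ 'U' := hpre
    rw [ih (by omega)]
    have hsplit : (List.range' start (l.length - start)) =
        List.range' start (i - start) ++ i :: List.range' (i + 1) (l.length - (i + 1)) := by
      have h1 : i :: List.range' (i + 1) (l.length - (i + 1)) =
          List.range' i (l.length - i) := by
        have he : l.length - i = (l.length - (i + 1)) + 1 := by omega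
        rw [he, List.range'_succ]
      rw [h1]
      have h2 : l.length - start = (i - start) + (l.length - i) := by omega
      rw [h2, ← List.range'_append_1]
      have h3 : start + (i - start) = i := by omega
      rw [h3]
    rw [hsplit]
    have hrep : rep = pvRef l i := by
      show (if 0 < i ∧ i < l.length - 1 ∧ pvIsCons (l.getD (i - 1) ' ') = true
              ∧ pvIsCons (l.getD (i + 1) ' ') = true
            then (if ch = 'u' then 'v' else 'V') else ch) = _
      unfold pvRef
      have hiff : (0 < i ∧ i < l.length - 1 ∧ pvIsCons (l.getD (i - 1) ' ') = true
              ∧ pvIsCons (l.getD (i + 1) ' ') = true) ↔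
          ((l.getD i ' ' = 'u' ∨ l.getD i ' ' = 'U') ∧
            (0 < i ∧ pvIsCons (l.getD (i - 1) ' ') = true) ∧
            (i + 1 < l.length ∧ pvIsCons (l.getD (i + 1) ' ') = true)) := by
        constructor
        · rintro ⟨a, b, c', d⟩
          exact ⟨hch', ⟨a, c'⟩, ⟨by omega, d⟩⟩
        · rintro ⟨-, ⟨a, c'⟩, ⟨b, d⟩⟩
          exact ⟨a, by omega, c', d⟩
      exact if_congr hiff rfl rfl
    simp only [List.map_append, List.map_cons]
    rw [pvMap_range'_eq_slice l start (i - start) (by omega)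
          (fun j hj1 hj2 => hpre' j hj1 (by omega)), hrep]
    simp [List.append_assoc]

-- when text has no 'u'/'U', pvRefList is the identity
lemma pvRefList_id (l : List Char) (hu : 'u' ∉ l) (hU : 'U' ∉ l) : pvRefList l = l := by
  unfold pvRefList
  apply List.ext_getElem?
  intro j
  by_cases hj : j < l.length
  · rw [List.getElem?_map, List.getElem?_range' (by simpa using hj), Option.map_some,
        List.getElem?_eq_getElem hj]
    simp only [Nat.one_mul, Nat.zero_add]
    congr 1
    have hg : l.getD j ' ' = l[j] := by
      rw [List.getD_eq_getElem?_getD, List.getElem?_eq_getElem hj]; rfl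
    rw [pvRef_eq_self_of_not_vu l j ⟨?_, ?_⟩, hg]
    · rw [hg]; intro h; exact hu (h ▸ List.getElem_mem hj)
    · rw [hg]; intro h; exact hU (h ▸ List.getElem_mem hj)
  · rw [List.getElem?_map, List.getElem?_eq_none (by simpa using hj),
        List.getElem?_eq_none (by omega)]
    rfl

-- ===== VERDICT (by name: the statement is the Claim_ definition above) =====
theorem fix_vu_confusion_py_spec : Claim_equal_fix_vu_confusion_py := by
  unfold Claim_equal_fix_vu_confusion_py Spec_fix_vu_confusion_py
  intro text _
  unfold fix_vu_confusion_py fix_vu_confusion_py_alt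
  rw [pvLoopB_spec text.toList 0 [] (by omega)]
  simp only [Nat.sub_zero, List.nil_append]
  split_ifs with h
  · obtain ⟨hu, hU⟩ := h
    rw [show (List.range' 0 text.toList.length).map (pvRef text.toList) = pvRefList text.toList from rfl,
        pvRefList_id text.toList (by simpa using hu) (by simpa using hU)]
    simp [String.mk]
  · show String.mk (text.toList.zipIdx.foldl pvStepA text.toList) = _
    rw [pvA_eq_refList]
    rfl
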